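-- pv_equiv track=rewrite | github.com/vik729/OP_TCG_Simulator | tools/normalize_cards.py | normalize_subtypes
-- ===== SOURCE A (Python) =====
-- def normalize_subtypes(raw, registry):
--     """Tokenize `raw` using longest-prefix-first matching against `registry`.
--
--     - Case-insensitive match; emits the canonical form from `registry`.
--     - Returns (matched_subtypes, unknown_tokens).
--     - Unknown tokens are single whitespace-delimited words that don't start
--       any registry entry; the matcher continues past them instead of hanging.
--     """
--     if not raw:
--         return [], []
--
--     by_len = sorted(registry, key=len, reverse=True)
--     remaining = raw.strip()
--     result = []
--     unknown = []
--
--     while remaining: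
--         remaining_lower = remaining.lower()
--         matched = None
--         for entry in by_len:
--             entry_lower = entry.lower()
--             if not remaining_lower.startswith(entry_lower):
--                 continue
--             # Enforce a word boundary: next char must be end-of-string
--             # or whitespace. Prevents e.g. 'Navy' from matching 'NavyBlue'.
--             tail_idx = len(entry)
--             if tail_idx == len(remaining) or remaining[tail_idx].isspace():
--                 matched = entry  # canonical form
--                 break
--
--         if matched:
--             result.append(matched)
--             remaining = remaining[len(matched):].lstrip()
--         else:
--             # Consume the next whitespace-delimited word as unknown.
--             word, _, rest = remaining.partition(" ")
--             unknown.append(word)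
--             remaining = rest.strip()
--
--     return result, unknown
-- ===== SOURCE B (Python) =====
-- def normalize_subtypes(raw, registry):
--     """Tokenize `raw` against `registry`, longest match first (case-insensitive).
--
--     Alternative algorithm: build once a dict lowercased-entry -> first
--     canonical form plus the descending list of distinct entry lengths; each
--     step then does one dict lookup per distinct length instead of a prefix
--     test against every registry entry.
--     """
--     if not raw:
--         return [], []
--
--     canon = {}
--     for entry in registry:
--         canon.setdefault(entry.lower(), entry)
--     lengths = sorted({len(e) for e in registry}, reverse=True)
--
--     result = []
--     unknown = []
--     remaining = raw.strip()
--
--     while remaining: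
--         remaining_lower = remaining.lower()
--         n = len(remaining)
--         matched = None
--         for L in lengths:
--             if L > n:
--                 continue
--             if L != n and not remaining[L].isspace():
--                 continue
--             hit = canon.get(remaining_lower[:L])
--             if hit is not None:
--                 matched = hit
--                 break
--
--         if matched is not None:
--             result.append(matched)
--             remaining = remaining[len(matched):].lstrip()
--         else:
--             word, _, rest = remaining.partition(" ")
--             unknown.append(word)
--             remaining = rest.strip()
--
--     return result, unknown
-- ===== Notes on version B (the rewrite author's own statement) =====
-- stated objective: alternative
-- what changed: A rescans the whole length-sorted registry at every tokenizer step; B instead precomputes a lowercase->canonical dict (first occurrence wins, matching A's stable sort) plus the descending list of distinct entry lengths, and each step does one dict probe per distinct length rather than a prefix test against every registry entry.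
import Mathlib
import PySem

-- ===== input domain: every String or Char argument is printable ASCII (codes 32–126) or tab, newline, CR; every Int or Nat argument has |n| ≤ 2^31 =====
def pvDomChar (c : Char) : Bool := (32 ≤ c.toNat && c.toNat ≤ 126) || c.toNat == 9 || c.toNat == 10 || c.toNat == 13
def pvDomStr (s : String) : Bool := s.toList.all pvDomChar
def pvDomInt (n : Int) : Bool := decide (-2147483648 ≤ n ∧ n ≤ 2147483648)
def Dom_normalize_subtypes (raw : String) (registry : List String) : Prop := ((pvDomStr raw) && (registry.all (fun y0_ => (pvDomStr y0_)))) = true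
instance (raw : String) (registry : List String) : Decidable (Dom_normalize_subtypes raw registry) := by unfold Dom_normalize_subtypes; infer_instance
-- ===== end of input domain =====

-- B replaces A's per-step scan over the whole registry by a lowercase->canonical dict plus one probe
-- per distinct entry length (objective: alternative algorithm). Return values proved equal on all inputs.

-- ===== PORT A =====

-- `remaining[i].isspace()` (both Pythons index only with i < len(remaining), where pyGet? is some)
def nsSpaceAt (remaining : List Char) (i : Nat) : Bool :=
  match PySem.List.pyGet? remaining (i : Int) with
  | some c => PySem.Chars.isspace c
  | none => false

-- A's word-boundary test: `tail_idx == len(remaining) or remaining[tail_idx].isspace()`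
def nsBoundary (remaining : List Char) (tailIdx : Nat) : Bool :=
  tailIdx == remaining.length || nsSpaceAt remaining tailIdx

-- A's inner `for entry in by_len` loop (rl = remaining.lower(), computed once per outer step)
def nsFindA (remaining rl : List Char) : List String → Option String
  | [] => none
  | entry :: rest =>
    if PySem.Chars.startswith rl (PySem.Chars.lower entry.toList) then
      if nsBoundary remaining entry.toList.length then some entry
      else nsFindA remaining rl rest
    else nsFindA remaining rl rest

-- `remaining.partition(" ")` (word before the first ' ', rest after it; exact for this one-char sep)
def nsPartitionSpace (s : List Char) : List Char × List Char :=
  let w := s.takeWhile (fun c => !(c == ' '))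
  (w, if w.length = s.length then [] else s.drop (w.length + 1))

-- lemmas the loops need for termination (length of `remaining` strictly decreases)
theorem nsStrip_len_le (s : List Char) : (PySem.Chars.strip s).length ≤ s.length := by
  simp only [PySem.Chars.strip, PySem.Chars.rstrip, PySem.Chars.lstrip]
  calc (List.dropWhile PySem.Chars.isspace (List.dropWhile PySem.Chars.isspace s).reverse).reverse.length
      ≤ (List.dropWhile PySem.Chars.isspace s).reverse.length := by
        rw [List.length_reverse]; exact List.length_dropWhile_le _ _
    _ ≤ s.length := by rw [List.length_reverse]; exact List.length_dropWhile_le _ _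

theorem nsStep_lt (r : List Char) (h : r ≠ []) (L : Nat)
    (hb : L = r.length ∨ nsSpaceAt r L = true) :
    (PySem.Chars.lstrip (r.drop L)).length < r.length := by
  rcases hb with hb | hb
  · subst hb
    simp [PySem.Chars.lstrip, List.length_pos_iff, h]
  · have hsome : ∃ c, PySem.List.pyGet? r (L : Int) = some c ∧ PySem.Chars.isspace c = true := by
      unfold nsSpaceAt at hb
      cases hg : PySem.List.pyGet? r (L : Int) with
      | none => rw [hg] at hb; simp at hb
      | some c => rw [hg] at hb; exact ⟨c, rfl, hb⟩
    obtain ⟨c, hg, hc⟩ := hsome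
    rw [PySem.List.pyGet?_natCast] at hg
    have hL : L < r.length := by
      by_contra hnot
      rw [List.getElem?_eq_none (by omega)] at hg
      simp at hg
    have hdrop : r.drop L = r[L] :: r.drop (L + 1) := List.drop_eq_getElem_cons hL
    have hcc : r[L] = c := by
      have := List.getElem?_eq_getElem hL
      rw [this] at hg; exact Option.some.inj hg
    rw [hdrop, PySem.Chars.lstrip, List.dropWhile_cons_of_pos (by rw [hcc]; exact hc)]
    have := List.length_dropWhile_le PySem.Chars.isspace (r.drop (L + 1))
    have := List.length_drop (l := r) (i := L + 1)
    omega

theorem nsRest_lt (r : List Char) (h : r ≠ []) :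
    (PySem.Chars.strip (nsPartitionSpace r).2).length < r.length := by
  have hlen : (nsPartitionSpace r).2.length < r.length := by
    unfold nsPartitionSpace
    simp only []
    split
    · simpa [List.length_pos_iff] using h
    · rename_i hne
      have hw : (r.takeWhile (fun c => !(c == ' '))).length ≤ r.length :=
        List.IsPrefix.length_le (List.takeWhile_prefix _)
      rw [List.length_drop]
      omega
  exact lt_of_le_of_lt (nsStrip_len_le _) hlen

theorem nsFindA_some_boundary (r rl : List Char) (l : List String) (m : String)
    (hm : nsFindA r rl l = some m) : nsBoundary r m.toList.length = true := by
  induction l with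
  | nil => simp [nsFindA] at hm
  | cons e rest ih =>
    unfold nsFindA at hm
    split at hm
    · split at hm
      · cases hm; assumption
      · exact ih hm
    · exact ih hm

-- A's `while remaining:` loop
def nsLoopA (byLen : List String) (remaining : List Char) : List String × List String :=
  if h : remaining = [] then ([], [])
  else
    match hm : nsFindA remaining (PySem.Chars.lower remaining) byLen with
    | some m =>
      let out := nsLoopA byLen (PySem.Chars.lstrip (remaining.drop m.toList.length))
      (m :: out.1, out.2)
    | none =>
      let p := nsPartitionSpace remaining
      let out := nsLoopA byLen (PySem.Chars.strip p.2)
      (out.1, String.ofList p.1 :: out.2)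
  termination_by remaining.length
  decreasing_by
  · exact nsStep_lt remaining h _ (by simpa [nsBoundary] using nsFindA_some_boundary _ _ _ _ hm)
  · exact nsRest_lt remaining h

def normalize_subtypes (raw : String) (registry : List String) : List String × List String :=
  if raw.toList = [] then ([], [])
  else nsLoopA (PySem.List.sorted registry (fun e => e.toList.length) true)
               (PySem.Chars.strip raw.toList)

-- ===== PORT B =====

-- `canon.setdefault(entry.lower(), entry)` over the registry
def nsCanon (registry : List String) : PySem.Dict (List Char) String :=
  registry.foldl (fun d entry => d.setdefault (PySem.Chars.lower entry.toList) entry)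
    PySem.Dict.empty

-- `sorted({len(e) for e in registry}, reverse=True)`
def nsLengths (registry : List String) : List Nat :=
  PySem.List.sorted (PySem.Set.ofList (registry.map (fun e => e.toList.length))) (fun x => x) true

-- B's inner `for L in lengths` loop
def nsFindB (remaining rl : List Char) (canon : PySem.Dict (List Char) String) :
    List Nat → Option String
  | [] => none
  | L :: rest =>
    if L > remaining.length then nsFindB remaining rl canon rest
    else if L ≠ remaining.length ∧ nsSpaceAt remaining L = false then
      nsFindB remaining rl canon rest
    else
      match canon.get? (PySem.List.slice rl none (some (L : Int))) with
      | some hit => some hit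
      | none => nsFindB remaining rl canon rest

-- every value stored in nsCanon has its own lowercase as key (needed for loop termination)
theorem nsCanon_get?_gen (l : List String) (d : PySem.Dict (List Char) String) (k : List Char) :
    (l.foldl (fun d e => d.setdefault (PySem.Chars.lower e.toList) e) d).get? k
      = (d.get? k).or (l.find? (fun e => PySem.Chars.lower e.toList == k)) := by
  induction l generalizing d with
  | nil => simp
  | cons e rest ih =>
    simp only [List.foldl_cons, ih, List.find?_cons]
    by_cases hk : PySem.Chars.lower e.toList = k
    · subst hk
      rw [PySem.Dict.get?_setdefault_self]
      cases d.get? (PySem.Chars.lower e.toList) <;> simp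
    · rw [PySem.Dict.get?_setdefault_of_ne _ _ (fun h => hk h.symm)]
      simp [beq_eq_false_iff_ne.mpr hk]

theorem nsCanon_get? (registry : List String) (k : List Char) :
    (nsCanon registry).get? k = registry.find? (fun e => PySem.Chars.lower e.toList == k) := by
  unfold nsCanon
  rw [nsCanon_get?_gen]
  simp [PySem.Dict.empty, PySem.Dict.get?]

theorem nsCanon_sound (registry : List String) (k : List Char) (v : String)
    (h : (nsCanon registry).get? k = some v) : PySem.Chars.lower v.toList = k := by
  rw [nsCanon_get?] at h
  have := List.find?_some h
  exact beq_iff_eq.mp this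

theorem nsFindB_some (r rl : List Char) (canon : PySem.Dict (List Char) String)
    (ls : List Nat) (hit : String) (h : nsFindB r rl canon ls = some hit) :
    ∃ L, L ≤ r.length ∧ (L = r.length ∨ nsSpaceAt r L = true) ∧
      canon.get? (PySem.List.slice rl none (some (L : Int))) = some hit := by
  induction ls with
  | nil => simp [nsFindB] at h
  | cons L rest ih =>
    unfold nsFindB at h
    split at h
    · exact ih h
    · split at h
      · exact ih h
      · rename_i h1 h2
        split at h
        · rename_i hg
          cases h
          refine ⟨L, by omega, ?_, hg⟩
          by_cases hL : L = r.length
          · exact Or.inl hL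
          · refine Or.inr ?_
            rcases Bool.eq_false_or_eq_true (nsSpaceAt r L) with hs | hs
            · exact hs
            · exact absurd ⟨hL, hs⟩ h2
        · exact ih h

theorem nsLoopB_dec (registry : List String) (remaining : List Char) (h : remaining ≠ [])
    (lengths : List Nat) (m : String)
    (hm : nsFindB remaining (PySem.Chars.lower remaining) (nsCanon registry) lengths = some m) :
    (PySem.Chars.lstrip (remaining.drop m.toList.length)).length < remaining.length := by
  obtain ⟨L, hLle, hb, hget⟩ := nsFindB_some _ _ _ _ _ hm
  have hkey := nsCanon_sound registry _ _ hget
  have hlen : m.toList.length = L := by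
    have h1 : (PySem.Chars.lower m.toList).length = m.toList.length := by
      simp [PySem.Chars.lower]
    rw [hkey] at h1
    rw [PySem.List.slice_to _ (by positivity)] at h1
    simp [PySem.Chars.lower] at h1 ⊢
    omega
  rw [hlen]
  exact nsStep_lt remaining h L hb

-- B's `while remaining:` loop; carries the key/value relation of `canon` for termination
def nsLoopB (lengths : List Nat) (canon : PySem.Dict (List Char) String)
    (registry : List String) (hcanon : canon = nsCanon registry)
    (remaining : List Char) : List String × List String :=
  if h : remaining = [] then ([], [])
  else
    match hm : nsFindB remaining (PySem.Chars.lower remaining) canon lengths with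
    | some m =>
      let out := nsLoopB lengths canon registry hcanon
        (PySem.Chars.lstrip (remaining.drop m.toList.length))
      (m :: out.1, out.2)
    | none =>
      let p := nsPartitionSpace remaining
      let out := nsLoopB lengths canon registry hcanon (PySem.Chars.strip p.2)
      (out.1, String.ofList p.1 :: out.2)
  termination_by remaining.length
  decreasing_by
  · exact nsLoopB_dec registry remaining h lengths m (by rw [hcanon] at hm; exact hm)
  · exact nsRest_lt remaining h

def normalize_subtypes_alt (raw : String) (registry : List String) : List String × List String :=
  if raw.toList = [] then ([], [])
  else nsLoopB (nsLengths registry) (nsCanon registry) registry rfl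
               (PySem.Chars.strip raw.toList)

-- ===== PRECONDITION & SPEC =====
def Spec_normalize_subtypes (raw : String) (registry : List String) (out : List String × List String) : Prop := out = normalize_subtypes_alt raw registry
instance (raw : String) (registry : List String) (out : List String × List String) : Decidable (Spec_normalize_subtypes raw registry out) := by unfold Spec_normalize_subtypes; infer_instance

-- ===== CLAIM (what is proved, stated in full; the proofs are below) =====
def Claim_equal_normalize_subtypes : Prop := ∀ (raw : String) (registry : List String), Dom_normalize_subtypes raw registry → Spec_normalize_subtypes raw registry (normalize_subtypes raw registry)

-- ===== LEMMAS AND PROOFS =====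

-- ---- A's inner loop is List.find? ----

theorem nsFindA_eq_find? (r rl : List Char) (l : List String) :
    nsFindA r rl l = l.find?
      (fun e => PySem.Chars.startswith rl (PySem.Chars.lower e.toList)
                  && nsBoundary r e.toList.length) := by
  induction l with
  | nil => rfl
  | cons e rest ih =>
    unfold nsFindA
    split
    · rename_i h1
      split
      · rename_i h2
        rw [List.find?_cons_of_pos (by simp only [h1, h2, Bool.and_self])]
      · rename_i h2
        rw [List.find?_cons_of_neg
          (by simp only [h1, Bool.true_and]; simpa using h2), ih]
    · rename_i h1
      rw [List.find?_cons_of_neg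
        (by simp only [Bool.and_eq_true, not_and]; intro hx; exact absurd hx h1), ih]

theorem find?_filter_of_imp {α : Type} (l : List α) (p q : α → Bool)
    (h : ∀ x, p x = true → q x = true) : (l.filter q).find? p = l.find? p := by
  induction l with
  | nil => rfl
  | cons a rest ih =>
    by_cases hp : p a = true
    · rw [List.filter_cons_of_pos (h a hp), List.find?_cons_of_pos hp,
        List.find?_cons_of_pos hp]
    · by_cases hq : q a = true
      · rw [List.filter_cons_of_pos hq, List.find?_cons_of_neg (by simpa using hp),
          List.find?_cons_of_neg (by simpa using hp), ih]
      · rw [List.filter_cons_of_neg (by simpa using hq),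
          List.find?_cons_of_neg (by simpa using hp), ih]

theorem find?_congr' {α : Type} (l : List α) (p q : α → Bool)
    (h : ∀ x ∈ l, p x = q x) : l.find? p = l.find? q := by
  induction l with
  | nil => rfl
  | cons a rest ih =>
    rw [List.find?_cons, List.find?_cons, h a (by simp)]
    split
    · rfl
    · exact ih (fun x hx => h x (by simp [hx]))

-- ---- one group (all registry entries of one length) versus one dict probe ----

theorem nsFindA_group (registry : List String) (r rl : List Char)
    (hrl : rl.length = r.length) (L : Nat) :
    nsFindA r rl (registry.filter (fun e => e.toList.length == L))
      = if L ≤ r.length ∧ (L = r.length ∨ nsSpaceAt r L = true)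
        then (nsCanon registry).get? (PySem.List.slice rl none (some (L : Int)))
        else none := by
  rw [nsFindA_eq_find?]
  split
  · rename_i hcond
    obtain ⟨hLle, hb⟩ := hcond
    rw [nsCanon_get?, PySem.List.slice_to _ (by positivity)]
    have htoNat : ((L : Int)).toNat = L := rfl
    rw [htoNat]
    have hbound : nsBoundary r L = true := by
      unfold nsBoundary
      rcases hb with hb | hb
      · simp [hb]
      · simp [hb]
    have htake : (rl.take L).length = L := by
      rw [List.length_take]
      omega
    have hstep1 : (registry.filter (fun e => e.toList.length == L)).find?
        (fun e => PySem.Chars.startswith rl (PySem.Chars.lower e.toList)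
                    && nsBoundary r e.toList.length)
        = (registry.filter (fun e => e.toList.length == L)).find?
            (fun e => PySem.Chars.lower e.toList == rl.take L) := by
      apply find?_congr'
      intro e he
      have hlenE : e.toList.length = L := by
        have := List.of_mem_filter he
        simpa using this
      have hlow : (PySem.Chars.lower e.toList).length = L := by
        simp [PySem.Chars.lower, hlenE]
      rw [hlenE, hbound, Bool.and_true]
      have hiff : PySem.Chars.startswith rl (PySem.Chars.lower e.toList) = true
          ↔ (PySem.Chars.lower e.toList == rl.take L) = true := by
        rw [PySem.Chars.startswith_iff, List.prefix_iff_eq_take, hlow, beq_iff_eq]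
      exact Bool.eq_iff_iff.mpr hiff
    rw [hstep1]
    apply find?_filter_of_imp
    intro e hp
    have : PySem.Chars.lower e.toList = rl.take L := by simpa using hp
    have hlenE : e.toList.length = (rl.take L).length := by
      rw [← this]; simp [PySem.Chars.lower]
    simp [hlenE, htake]
  · rename_i hcond
    rw [List.find?_eq_none]
    intro e he
    have hlenE : e.toList.length = L := by
      have := List.of_mem_filter he
      simpa using this
    simp only [Bool.and_eq_true, not_and]
    intro hstart
    by_cases hLle : L ≤ r.length
    · have hb : ¬ (L = r.length ∨ nsSpaceAt r L = true) := fun h => hcond ⟨hLle, h⟩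
      push_neg at hb
      unfold nsBoundary
      rw [hlenE]
      simp [hb.1, hb.2]
    · exfalso
      rw [PySem.Chars.startswith_iff] at hstart
      have := List.IsPrefix.length_le hstart
      have hlow : (PySem.Chars.lower e.toList).length = L := by
        simp [PySem.Chars.lower, hlenE]
      omega

-- ---- scanning the grouped list equals B's scan over the distinct lengths ----

theorem nsFind_eq_on_flatMap (registry : List String) (r rl : List Char)
    (hrl : rl.length = r.length) (ls : List Nat) :
    nsFindA r rl (ls.flatMap (fun L => registry.filter (fun e => e.toList.length == L)))
      = nsFindB r rl (nsCanon registry) ls := by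
  induction ls with
  | nil => rfl
  | cons L rest ih =>
    rw [List.flatMap_cons, nsFindA_eq_find?, List.find?_append, ← nsFindA_eq_find?,
      ← nsFindA_eq_find?, nsFindA_group registry r rl hrl L]
    unfold nsFindB
    by_cases hgt : L > r.length
    · rw [if_pos hgt, if_neg (by omega), Option.none_or, ih]
    · rw [if_neg hgt]
      by_cases hsp : L ≠ r.length ∧ nsSpaceAt r L = false
      · rw [if_pos hsp, if_neg, Option.none_or, ih]
        rintro ⟨-, h | h⟩
        · exact hsp.1 h
        · rw [hsp.2] at h; simp at h
      · have hcond : L ≤ r.length ∧ (L = r.length ∨ nsSpaceAt r L = true) := by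
          refine ⟨by omega, ?_⟩
          by_cases hL : L = r.length
          · exact Or.inl hL
          · refine Or.inr ?_
            rcases Bool.eq_false_or_eq_true (nsSpaceAt r L) with hs | hs
            · exact hs
            · exact absurd ⟨hL, hs⟩ hsp
        rw [if_neg hsp, if_pos hcond]
        cases hg : (nsCanon registry).get? (PySem.List.slice rl none (some (L : Int))) with
        | some hit => rw [Option.some_or]
        | none => rw [Option.none_or, ih]

-- ---- the stable length-descending sort is the concatenation of its length groups ----

theorem flatMap_congr' {α β : Type} (l : List α) (f h : α → List β)
    (hfh : ∀ x ∈ l, f x = h x) : l.flatMap f = l.flatMap h := by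
  induction l with
  | nil => rfl
  | cons a t ih =>
    rw [List.flatMap_cons, List.flatMap_cons, hfh a (by simp),
      ih (fun x hx => hfh x (by simp [hx]))]

theorem insertBy_nil {α : Type} (bef : α → α → Bool) (x : α) :
    PySem.List.insertBy bef x [] = [x] := rfl

theorem insertBy_cons {α : Type} (bef : α → α → Bool) (x y : α) (ys : List α) :
    PySem.List.insertBy bef x (y :: ys)
      = if bef x y = true then x :: y :: ys else y :: PySem.List.insertBy bef x ys := rfl

theorem insertBy_append_not {α : Type} (bef : α → α → Bool) (x : α) (l r : List α)
    (h : ∀ y ∈ l, bef x y = false) :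
    PySem.List.insertBy bef x (l ++ r) = l ++ PySem.List.insertBy bef x r := by
  induction l with
  | nil => rfl
  | cons y t ih =>
    rw [List.cons_append, insertBy_cons, if_neg (by simp [h y (by simp)]),
      ih (fun z hz => h z (by simp [hz])), List.cons_append]

theorem insertBy_front_of_lt (g : Nat → List String) (e : String) (Ls : List Nat)
    (hg : ∀ L ∈ Ls, ∀ x ∈ g L, x.toList.length = L)
    (hne : ∀ L ∈ Ls, g L ≠ [])
    (hlt : ∀ L ∈ Ls, L < e.toList.length) :
    PySem.List.insertBy (fun a b => decide (b.toList.length < a.toList.length)) e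
        (Ls.flatMap g)
      = e :: Ls.flatMap g := by
  cases Ls with
  | nil => rfl
  | cons L t =>
    rw [List.flatMap_cons]
    obtain ⟨x, xs, hx⟩ := List.exists_cons_of_ne_nil (hne L (by simp))
    have hbef : decide (x.toList.length < e.toList.length) = true := by
      rw [hg L (by simp) x (by simp [hx])]
      simpa using hlt L (by simp)
    rw [hx, List.cons_append, insertBy_cons, if_pos hbef]

theorem insertBy_flatMap_mem (Ls : List Nat) (g : Nat → List String) (e : String)
    (hdesc : Ls.Pairwise (fun a b => b < a))
    (hg : ∀ L ∈ Ls, ∀ x ∈ g L, x.toList.length = L)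
    (hne : ∀ L ∈ Ls, g L ≠ [])
    (hmem : e.toList.length ∈ Ls) :
    PySem.List.insertBy (fun a b => decide (b.toList.length < a.toList.length)) e
        (Ls.flatMap g)
      = Ls.flatMap (fun L => if L = e.toList.length then g L ++ [e] else g L) := by
  induction Ls with
  | nil => cases hmem
  | cons L Ls' ih =>
    rw [List.flatMap_cons, List.flatMap_cons]
    have hdesc' := (List.pairwise_cons.mp hdesc).2
    have hhead := (List.pairwise_cons.mp hdesc).1
    by_cases hL : L = e.toList.length
    · rw [if_pos hL]
      rw [insertBy_append_not _ _ _ _ (fun y hy => by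
        simp only [decide_eq_false_iff_not, not_lt]
        rw [hg L (by simp) y hy, hL])]
      rw [insertBy_front_of_lt g e Ls'
        (fun L' hL' => hg L' (by simp [hL']))
        (fun L' hL' => hne L' (by simp [hL']))
        (fun L' hL' => hL ▸ hhead L' hL')]
      rw [flatMap_congr' Ls' (fun L' => if L' = e.toList.length then g L' ++ [e] else g L') g
        (fun L' hL' => by
          show (if L' = e.toList.length then g L' ++ [e] else g L') = g L'
          rw [if_neg]
          intro hc
          exact absurd (hc ▸ hhead L' hL') (by rw [hL]; exact lt_irrefl _))]
      simp
    · rw [if_neg hL]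
      have hmem' : e.toList.length ∈ Ls' := by
        rcases List.mem_cons.mp hmem with h | h
        · exact absurd h.symm hL
        · exact h
      have hgtL : e.toList.length < L := hhead _ hmem'
      rw [insertBy_append_not _ _ _ _ (fun y hy => by
        simp only [decide_eq_false_iff_not, not_lt]
        rw [hg L (by simp) y hy]
        omega)]
      rw [ih hdesc'
        (fun L' hL' => hg L' (by simp [hL']))
        (fun L' hL' => hne L' (by simp [hL']))
        hmem']

theorem insertBy_flatMap_not_mem (Ls : List Nat) (g : Nat → List String) (e : String)
    (hdesc : Ls.Pairwise (fun a b => b < a))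
    (hg : ∀ L ∈ Ls, ∀ x ∈ g L, x.toList.length = L)
    (hne : ∀ L ∈ Ls, g L ≠ [])
    (hmem : e.toList.length ∉ Ls) :
    PySem.List.insertBy (fun a b => decide (b.toList.length < a.toList.length)) e
        (Ls.flatMap g)
      = (PySem.List.insertBy (fun a b => decide (b < a)) e.toList.length Ls).flatMap
          (fun L => if L = e.toList.length then [e] else g L) := by
  induction Ls with
  | nil =>
    rw [List.flatMap_nil, insertBy_nil, insertBy_nil, List.flatMap_cons, if_pos rfl,
      List.flatMap_nil, List.append_nil]
  | cons L Ls' ih =>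
    have hdesc' := (List.pairwise_cons.mp hdesc).2
    have hhead := (List.pairwise_cons.mp hdesc).1
    have hLne : L ≠ e.toList.length := fun h => hmem (h ▸ List.mem_cons_self .. )
    have hmem' : e.toList.length ∉ Ls' := fun h => hmem (List.mem_cons_of_mem _ h)
    rcases Nat.lt_or_ge L e.toList.length with hlt | hge
    · have hlt' : ∀ L' ∈ L :: Ls', L' < e.toList.length := by
        intro L' hL'
        rcases List.mem_cons.mp hL' with h | h
        · omega
        · have := hhead L' h; omega
      have hbef : (fun a b : Nat => decide (b < a)) e.toList.length L = true := by
        simpa using hlt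
      rw [insertBy_front_of_lt g e (L :: Ls') hg hne hlt', insertBy_cons, if_pos hbef]
      have hsplit : List.flatMap (fun L' => if L' = e.toList.length then [e] else g L')
          (e.toList.length :: L :: Ls')
          = [e] ++ List.flatMap (fun L' => if L' = e.toList.length then [e] else g L')
              (L :: Ls') := by
        rw [List.flatMap_cons]
        congr 1
        show (if e.toList.length = e.toList.length then [e] else g e.toList.length) = [e]
        rw [if_pos rfl]
      rw [hsplit, flatMap_congr' (L :: Ls')
        (fun L' => if L' = e.toList.length then [e] else g L') g
        (fun L' hL' => by
          show (if L' = e.toList.length then [e] else g L') = g L'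
          rw [if_neg (by have := hlt' L' hL'; omega)])]
      rfl
    · have hgt : e.toList.length < L := by omega
      rw [List.flatMap_cons,
        insertBy_append_not _ _ _ _ (fun y hy => by
          simp only [decide_eq_false_iff_not, not_lt]
          rw [hg L (List.mem_cons_self ..) y hy]
          omega),
        insertBy_cons, if_neg (by simp only [decide_eq_true_eq]; omega),
        List.flatMap_cons, if_neg hLne,
        ih hdesc'
          (fun L' hL' => hg L' (List.mem_cons_of_mem _ hL'))
          (fun L' hL' => hne L' (List.mem_cons_of_mem _ hL'))
          hmem']

theorem mem_nsLengths (p : List String) (L : Nat) :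
    L ∈ nsLengths p ↔ L ∈ p.map (fun e => e.toList.length) := by
  unfold nsLengths
  rw [PySem.List.mem_sorted, PySem.Set.mem_ofList]

theorem nsLengths_desc (p : List String) : (nsLengths p).Pairwise (fun a b => b < a) := by
  have h1 := PySem.List.sorted_pairwise_rev
    (PySem.Set.ofList (p.map (fun e => e.toList.length))) (fun x => x)
  have h2 : (nsLengths p).Nodup :=
    (PySem.List.sorted_perm _ _ _).symm.nodup
      (PySem.Set.nodup_ofList (p.map (fun e => e.toList.length)))
  exact (h1.and h2).imp (fun h => lt_of_le_of_ne h.1 (Ne.symm h.2))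

theorem nsLengths_group_props (p : List String) :
    (∀ L ∈ nsLengths p, ∀ x ∈ p.filter (fun e => e.toList.length == L),
        x.toList.length = L)
    ∧ (∀ L ∈ nsLengths p, p.filter (fun e => e.toList.length == L) ≠ []) := by
  constructor
  · intro L _ x hx
    simpa using List.of_mem_filter hx
  · intro L hL
    rw [mem_nsLengths] at hL
    obtain ⟨x, hxp, hxl⟩ := List.mem_map.mp hL
    intro hnil
    rw [List.filter_eq_nil_iff] at hnil
    exact hnil x hxp (by simpa using hxl)

theorem sorted_flatMap (registry : List String) :
    PySem.List.sorted registry (fun e => e.toList.length) true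
      = (nsLengths registry).flatMap
          (fun L => registry.filter (fun e => e.toList.length == L)) := by
  induction registry using List.reverseRecOn with
  | nil => rfl
  | append_singleton p e ih =>
    rw [PySem.List.sorted_rev_eq_foldl_insertBy, List.foldl_concat,
      ← PySem.List.sorted_rev_eq_foldl_insertBy, ih]
    obtain ⟨hg, hne⟩ := nsLengths_group_props p
    have hdesc := nsLengths_desc p
    by_cases hmem : e.toList.length ∈ nsLengths p
    · have hcont : (PySem.Set.ofList (p.map (fun e => e.toList.length))).contains
          e.toList.length = true :=
        List.elem_eq_true_of_mem
          ((PySem.Set.mem_ofList _ _).mpr ((mem_nsLengths p _).mp hmem))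
      have hLs : nsLengths (p ++ [e]) = nsLengths p := by
        unfold nsLengths
        rw [List.map_append]
        simp only [List.map_cons, List.map_nil]
        congr 1
        unfold PySem.Set.ofList
        rw [List.foldl_concat]
        show PySem.Set.add (PySem.Set.ofList (p.map (fun e => e.toList.length)))
          e.toList.length = PySem.Set.ofList (p.map (fun e => e.toList.length))
        unfold PySem.Set.add
        rw [if_pos hcont]
      rw [hLs, insertBy_flatMap_mem _ _ _ hdesc hg hne hmem]
      apply flatMap_congr'
      intro L hL
      rw [List.filter_append]
      by_cases hLe : L = e.toList.length
      · rw [if_pos hLe,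
          List.filter_cons_of_pos (by simpa using hLe.symm), List.filter_nil]
      · rw [if_neg hLe,
          List.filter_cons_of_neg (by simpa using fun h => hLe h.symm), List.filter_nil,
          List.append_nil]
    · have hcont : (PySem.Set.ofList (p.map (fun e => e.toList.length))).contains
          e.toList.length = false := by
        rcases Bool.eq_false_or_eq_true
          ((PySem.Set.ofList (p.map (fun e => e.toList.length))).contains e.toList.length)
          with h | h
        · exact absurd ((mem_nsLengths p _).mpr
            ((PySem.Set.mem_ofList _ _).mp (List.mem_of_elem_eq_true h))) hmem
        · exact h
      have hLs : nsLengths (p ++ [e])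
          = PySem.List.insertBy (fun a b => decide (b < a)) e.toList.length (nsLengths p) := by
        unfold nsLengths
        rw [List.map_append]
        simp only [List.map_cons, List.map_nil]
        have hofl : (PySem.Set.ofList (p.map (fun e => e.toList.length) ++ [e.toList.length])
              : List Nat)
            = PySem.Set.ofList (p.map (fun e => e.toList.length)) ++ [e.toList.length] := by
          unfold PySem.Set.ofList
          rw [List.foldl_concat]
          show PySem.Set.add (PySem.Set.ofList (p.map (fun e => e.toList.length)))
            e.toList.length = _
          unfold PySem.Set.add
          rw [if_neg (by rw [hcont]; simp)]
          rfl
        rw [hofl, PySem.List.sorted_rev_eq_foldl_insertBy, List.foldl_concat,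
          ← PySem.List.sorted_rev_eq_foldl_insertBy]
      rw [hLs, insertBy_flatMap_not_mem _ _ _ hdesc hg hne hmem]
      apply flatMap_congr'
      intro L hL
      rw [List.filter_append]
      by_cases hLe : L = e.toList.length
      · have hfilp : p.filter (fun x => x.toList.length == L) = [] := by
          rw [List.filter_eq_nil_iff]
          intro x hxp hb
          apply hmem
          rw [mem_nsLengths, ← hLe]
          exact List.mem_map.mpr ⟨x, hxp, by simpa using hb⟩
        rw [if_pos hLe, hfilp,
          List.filter_cons_of_pos (by simpa using hLe.symm), List.filter_nil,
          List.nil_append]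
      · rw [if_neg hLe,
          List.filter_cons_of_neg (by simpa using fun h => hLe h.symm), List.filter_nil,
          List.append_nil]

-- ---- the two while-loops agree ----

theorem loops_eq (registry : List String) (n : Nat) :
    ∀ r : List Char, r.length ≤ n →
      nsLoopA (PySem.List.sorted registry (fun e => e.toList.length) true) r
        = nsLoopB (nsLengths registry) (nsCanon registry) registry rfl r := by
  induction n with
  | zero =>
    intro r hr
    have hr0 : r = [] := by
      cases r with
      | nil => rfl
      | cons a t => simp at hr
    rw [nsLoopA, nsLoopB, dif_pos hr0, dif_pos hr0]
  | succ n ih =>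
    intro r hr
    by_cases hr0 : r = []
    · rw [nsLoopA, nsLoopB, dif_pos hr0, dif_pos hr0]
    · rw [nsLoopA, nsLoopB, dif_neg hr0, dif_neg hr0]
      have hrl : (PySem.Chars.lower r).length = r.length := by
        simp [PySem.Chars.lower]
      have hfind : nsFindA r (PySem.Chars.lower r)
            (PySem.List.sorted registry (fun e => e.toList.length) true)
          = nsFindB r (PySem.Chars.lower r) (nsCanon registry) (nsLengths registry) := by
        rw [sorted_flatMap]
        exact nsFind_eq_on_flatMap registry r _ hrl (nsLengths registry)
      cases hA : nsFindA r (PySem.Chars.lower r)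
          (PySem.List.sorted registry (fun e => e.toList.length) true) with
      | some m =>
        have hB : nsFindB r (PySem.Chars.lower r) (nsCanon registry) (nsLengths registry)
            = some m := hfind.symm.trans hA
        simp only [hA]
        have hlt : (PySem.Chars.lstrip (r.drop m.toList.length)).length < r.length :=
          nsStep_lt r hr0 _ (by simpa [nsBoundary] using nsFindA_some_boundary _ _ _ _ hA)
        rw [ih _ (by omega)]
        split
        · rename_i m' hB'
          rw [hB'] at hB
          cases hB
          rfl
        · rename_i hB'
          rw [hB'] at hB
          cases hB
      | none =>
        have hB : nsFindB r (PySem.Chars.lower r) (nsCanon registry) (nsLengths registry)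
            = none := hfind.symm.trans hA
        simp only [hA]
        have hlt := nsRest_lt r hr0
        rw [ih _ (by omega)]
        split
        · rename_i m' hB'
          rw [hB'] at hB
          cases hB
        · rfl

-- ===== VERDICT (by name: the statement is the Claim_ definition above) =====
theorem normalize_subtypes_spec : Claim_equal_normalize_subtypes := by
  unfold Claim_equal_normalize_subtypes
  intro raw registry _
  unfold Spec_normalize_subtypes normalize_subtypes normalize_subtypes_alt
  by_cases h : raw.toList = []
  · rw [if_pos h, if_pos h]
  · rw [if_neg h, if_neg h]
    exact (loops_eq registry (PySem.Chars.strip raw.toList).length _ le_rfl)
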